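-- pv_equiv track=rewrite | github.com/lukasz-marek/advent-of-code-2019 | adventofcode/days/day6.py | count_object_orbits
-- ===== SOURCE A (Python) =====
-- from typing import Dict, Optional, List, Set
--
-- def count_object_orbits(orbitting: str, data: Dict[str, List[str]]) -> int:
--     to_visit: List[str] = [orbitting]
--     orbits = 0
--     while to_visit:
--         current = to_visit.pop()
--         orbitting = data.get(current, [])
--         orbits += len(orbitting)
--         to_visit.extend(orbitting)
--     return orbits
-- ===== SOURCE B (Python) =====
-- def count_object_orbits(orbitting: str, data) -> int:
--     children = data.get(orbitting, [])
--     return len(children) + sum(count_object_orbits(child, data) for child in children)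
-- ===== Notes on version B (the rewrite author's own statement) =====
-- stated objective: simpler
-- what changed: Replaces the explicit work-stack loop that unfolds the orbit tree iteratively with a direct structural recursion: descendants(x) = len(children) + sum of descendants of each child.
import Mathlib
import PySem

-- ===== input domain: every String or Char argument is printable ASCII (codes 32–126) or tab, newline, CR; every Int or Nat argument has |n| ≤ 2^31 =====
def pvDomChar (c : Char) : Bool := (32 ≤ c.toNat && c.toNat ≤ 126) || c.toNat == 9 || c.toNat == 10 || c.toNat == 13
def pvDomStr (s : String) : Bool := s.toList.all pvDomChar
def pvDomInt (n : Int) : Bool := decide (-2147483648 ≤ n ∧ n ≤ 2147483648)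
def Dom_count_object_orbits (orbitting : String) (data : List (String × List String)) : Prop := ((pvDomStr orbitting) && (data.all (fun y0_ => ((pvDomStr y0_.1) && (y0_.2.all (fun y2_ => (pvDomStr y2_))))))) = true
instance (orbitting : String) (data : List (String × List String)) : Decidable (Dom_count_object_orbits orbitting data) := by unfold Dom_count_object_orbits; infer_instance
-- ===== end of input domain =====

-- B replaces A's explicit work-stack loop with a direct structural recursion over the orbit
-- tree (simpler); equal on every acyclic orbit mapping (Pre_), where A's loop terminates.

-- ===== PORT A =====
-- data.get(k, []) on the dict parameter (assoc list, first match)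
def pvGet (data : List (String × List String)) (k : String) : List String :=
  (PySem.Dict.mk data).getD k []

-- step budget for A's while-loop: the number of nodes of the unfolded orbit tree rooted at x
-- (computed to depth f; depth data.length+1 is exact on every acyclic mapping, i.e. under Pre_)
def pvSize (data : List (String × List String)) : Nat → String → Nat
  | 0, _ => 1
  | f + 1, x => 1 + ((pvGet data x).map (pvSize data f)).sum

-- A's while-loop, step for step: pop from the end, count the children, extend at the end.
-- The Nat argument is only a termination budget (A's loop runs forever on a reachable cycle);
-- under Pre_ the budget pvSize data (data.length+1) orbitting is proved sufficient below.
def pvRunA (data : List (String × List String)) : Nat → List String → Int → Int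
  | 0, _, orbits => orbits
  | f + 1, to_visit, orbits =>
    match to_visit.getLast? with
    | none => orbits
    | some current =>
      let ch := pvGet data current
      pvRunA data f (to_visit.dropLast ++ ch) (orbits + ch.length)

def count_object_orbits (orbitting : String) (data : List (String × List String)) : Int :=
  pvRunA data (pvSize data (data.length + 1) orbitting) [orbitting] 0

-- ===== PORT B =====
-- B's recursion, to depth f: len(children) + sum of recursive calls on the children.
-- The Nat argument is only a termination budget (B's Python recursion is unbounded);
-- depth data.length+1 is proved exact on every acyclic mapping (Pre_).
def pvCnt (data : List (String × List String)) : Nat → String → Int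
  | 0, _ => 0
  | f + 1, x =>
    let children := pvGet data x
    (children.length : Int) + (children.map (pvCnt data f)).sum

def count_object_orbits_alt (orbitting : String) (data : List (String × List String)) : Int :=
  pvCnt data (data.length + 1) orbitting

-- ===== PRECONDITION & SPEC =====
def pvKeys (data : List (String × List String)) : List String := data.map Prod.fst

-- one peeling round: keep exactly the keys that still have a child among the kept keys
def pvPeel (data : List (String × List String)) (R : List String) : List String :=
  R.filter (fun k => (pvGet data k).any (fun c => R.contains c))

-- Pre_: A's while-loop terminates, i.e. no cycle of the orbit mapping is reachable from
-- orbitting (on a reachable cycle A never returns and B's recursion overflows). After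
-- data.length peeling rounds exactly the keys that can still reach a cycle remain; Pre_ says
-- orbitting is not one of them.
def Pre_count_object_orbits (orbitting : String) (data : List (String × List String)) : Prop :=
  orbitting ∉ (pvPeel data)^[data.length] (pvKeys data)
instance (orbitting : String) (data : List (String × List String)) : Decidable (Pre_count_object_orbits orbitting data) := by unfold Pre_count_object_orbits; infer_instance

def pvWitness_count_object_orbits : String × (List (String × List String)) :=
  ("COM", [("COM", ["A", "B"]), ("A", ["C"])])

def Spec_count_object_orbits (orbitting : String) (data : List (String × List String)) (out : Int) : Prop := out = count_object_orbits_alt orbitting data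
instance (orbitting : String) (data : List (String × List String)) (out : Int) : Decidable (Spec_count_object_orbits orbitting data out) := by unfold Spec_count_object_orbits; infer_instance

-- ===== CLAIM (what is proved, stated in full; the proofs are below) =====
def Claim_equal_count_object_orbits : Prop := ∀ (orbitting : String) (data : List (String × List String)), Dom_count_object_orbits orbitting data → Pre_count_object_orbits orbitting data → Spec_count_object_orbits orbitting data (count_object_orbits orbitting data)

-- ===== LEMMAS AND PROOFS =====

-- a non-key has no children
theorem pvGet_of_not_key (data : List (String × List String)) (x : String)
    (h : x ∉ pvKeys data) : pvGet data x = [] := by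
  rw [pvGet, PySem.Dict.getD_of_not_contains]
  rw [PySem.Dict.contains_eq_decide_mem_keys]
  simp only [PySem.Dict.keys, decide_eq_false_iff_not]
  simpa [pvKeys] using h

-- peeling only removes keys
theorem pvPeel_subset (data : List (String × List String)) (R : List String) (x : String)
    (h : x ∈ pvPeel data R) : x ∈ R := by
  exact List.mem_of_mem_filter h

-- a key peeled off by round i+1 has all its children peeled off by round i
theorem pvPeel_children (data : List (String × List String)) (i : Nat) (x : String)
    (hk : x ∈ pvKeys data) (hx : x ∉ (pvPeel data)^[i + 1] (pvKeys data)) :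
    ∀ c ∈ pvGet data x, c ∉ (pvPeel data)^[i] (pvKeys data) := by
  induction i with
  | zero =>
    intro c hc
    rw [Function.iterate_one] at hx
    rw [Function.iterate_zero_apply]
    have hp : ¬ ((pvGet data x).any (fun c => (pvKeys data).contains c) = true) := by
      intro hany
      exact hx (List.mem_filter.mpr ⟨hk, hany⟩)
    simp only [List.any_eq_true, List.contains_iff_mem] at hp
    push Not at hp
    simpa using hp c hc
  | succ i ih =>
    intro c hc
    by_cases hx1 : x ∈ (pvPeel data)^[i + 1] (pvKeys data)
    · rw [Function.iterate_succ_apply'] at hx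
      have hp : ¬ ((pvGet data x).any
          (fun c => ((pvPeel data)^[i + 1] (pvKeys data)).contains c) = true) := by
        intro hany
        exact hx (List.mem_filter.mpr ⟨hx1, hany⟩)
      simp only [List.any_eq_true, List.contains_iff_mem] at hp
      push Not at hp
      simpa using hp c hc
    · intro hmem
      have : c ∈ (pvPeel data)^[i] (pvKeys data) := by
        rw [Function.iterate_succ_apply'] at hmem
        exact pvPeel_subset data _ c hmem
      exact ih hx1 c hc this

-- B's recursion on a non-key is 0 at every depth
theorem pvCnt_of_not_key (data : List (String × List String)) (x : String)
    (h : x ∉ pvKeys data) : ∀ f, pvCnt data f x = 0 := by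
  intro f
  cases f with
  | zero => rfl
  | succ f => simp [pvCnt, pvGet_of_not_key data x h]

-- a node peeled off by round i has a stable count at every depth ≥ i
theorem pvCnt_stable (data : List (String × List String)) :
    ∀ i x, x ∉ (pvPeel data)^[i] (pvKeys data) →
    ∀ f g, i ≤ f → i ≤ g → pvCnt data f x = pvCnt data g x := by
  intro i
  induction i with
  | zero =>
    intro x hx f g _ _
    rw [Function.iterate_zero_apply] at hx
    rw [pvCnt_of_not_key data x hx, pvCnt_of_not_key data x hx]
  | succ i ih =>
    intro x hx f g hf hg
    by_cases hk : x ∈ pvKeys data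
    · obtain ⟨f', rfl⟩ : ∃ f', f = f' + 1 := ⟨f - 1, by omega⟩
      obtain ⟨g', rfl⟩ : ∃ g', g = g' + 1 := ⟨g - 1, by omega⟩
      have hch := pvPeel_children data i x hk hx
      simp only [pvCnt]
      congr 1
      congr 1
      exact List.map_congr_left fun c hc => ih c (hch c hc) f' g' (by omega) (by omega)
    · rw [pvCnt_of_not_key data x hk, pvCnt_of_not_key data x hk]

-- pvSize on a non-key is 1 at every depth
theorem pvSize_of_not_key (data : List (String × List String)) (x : String)
    (h : x ∉ pvKeys data) : ∀ f, pvSize data f x = 1 := by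
  intro f
  cases f with
  | zero => rfl
  | succ f => simp [pvSize, pvGet_of_not_key data x h]

-- a node peeled off by round i has a stable size at every depth ≥ i
theorem pvSize_stable (data : List (String × List String)) :
    ∀ i x, x ∉ (pvPeel data)^[i] (pvKeys data) →
    ∀ f g, i ≤ f → i ≤ g → pvSize data f x = pvSize data g x := by
  intro i
  induction i with
  | zero =>
    intro x hx f g _ _
    rw [Function.iterate_zero_apply] at hx
    rw [pvSize_of_not_key data x hx, pvSize_of_not_key data x hx]
  | succ i ih =>
    intro x hx f g hf hg
    by_cases hk : x ∈ pvKeys data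
    · obtain ⟨f', rfl⟩ : ∃ f', f = f' + 1 := ⟨f - 1, by omega⟩
      obtain ⟨g', rfl⟩ : ∃ g', g = g' + 1 := ⟨g - 1, by omega⟩
      have hch := pvPeel_children data i x hk hx
      simp only [pvSize]
      congr 1
      exact congrArg List.sum (List.map_congr_left fun c hc => ih c (hch c hc) f' g' (by omega) (by omega))
    · rw [pvSize_of_not_key data x hk, pvSize_of_not_key data x hk]

theorem pvSize_pos (data : List (String × List String)) (f : Nat) (x : String) :
    1 ≤ pvSize data f x := by
  cases f <;> simp [pvSize]

-- the surviving keys are closed under taking parents: a peeled node has peeled children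
theorem pvPeel_fix_closed (data : List (String × List String)) (x : String)
    (hx : x ∉ (pvPeel data)^[data.length] (pvKeys data)) :
    ∀ c ∈ pvGet data x, c ∉ (pvPeel data)^[data.length] (pvKeys data) := by
  by_cases hk : x ∈ pvKeys data
  · have hx1 : x ∉ (pvPeel data)^[data.length + 1] (pvKeys data) := by
      intro hmem
      rw [Function.iterate_succ_apply'] at hmem
      exact hx (pvPeel_subset data _ x hmem)
    exact pvPeel_children data data.length x hk hx1
  · intro c hc
    rw [pvGet_of_not_key data x hk] at hc
    exact absurd hc (List.not_mem_nil)

-- a peeled node's count at depth data.length+1 satisfies the tree recurrence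
theorem pvCnt_expand (data : List (String × List String)) (x : String)
    (hx : x ∉ (pvPeel data)^[data.length] (pvKeys data)) :
    pvCnt data (data.length + 1) x =
      ((pvGet data x).length : Int) + ((pvGet data x).map (pvCnt data (data.length + 1))).sum := by
  rw [pvCnt_stable data data.length x hx (data.length + 1) (data.length + 2)
    (by omega) (by omega)]
  rfl

-- a peeled node's size at depth data.length+1 satisfies the tree recurrence
theorem pvSize_expand (data : List (String × List String)) (x : String)
    (hx : x ∉ (pvPeel data)^[data.length] (pvKeys data)) :
    pvSize data (data.length + 1) x =
      1 + ((pvGet data x).map (pvSize data (data.length + 1))).sum := by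
  rw [pvSize_stable data data.length x hx (data.length + 1) (data.length + 2)
    (by omega) (by omega)]
  rfl

-- the stack invariant: for a stack of peeled nodes, with budget ≥ total remaining tree size,
-- A's loop adds the total count of the stack
theorem pvRunA_eq (data : List (String × List String)) :
    ∀ (f : Nat) (stack : List String) (acc : Int),
      (∀ x ∈ stack, x ∉ (pvPeel data)^[data.length] (pvKeys data)) →
      (stack.map (pvSize data (data.length + 1))).sum ≤ f →
      pvRunA data f stack acc = acc + (stack.map (pvCnt data (data.length + 1))).sum := by
  intro f
  induction f with
  | zero =>
    intro stack acc _ hle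
    have hnil : stack = [] := by
      cases stack with
      | nil => rfl
      | cons a l =>
        exfalso
        have := pvSize_pos data (data.length + 1) a
        simp only [List.map_cons, List.sum_cons] at hle
        omega
    subst hnil
    simp [pvRunA]
  | succ f ih =>
    intro stack acc hstack hle
    cases hlast : stack.getLast? with
    | none =>
      have hnil : stack = [] := List.getLast?_eq_none_iff.mp hlast
      subst hnil
      simp [pvRunA]
    | some x =>
      have hne : stack ≠ [] := by rintro rfl; simp at hlast
      have hdec : stack.dropLast ++ [x] = stack := by
        have h1 := List.dropLast_append_getLast hne
        have h2 : stack.getLast hne = x := by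
          rw [List.getLast?_eq_some_getLast hne] at hlast
          exact Option.some.inj hlast
        rw [h2] at h1
        exact h1
      simp only [pvRunA, hlast]
      rw [← hdec] at hle
      conv_rhs => rw [← hdec]
      simp only [List.map_append, List.sum_append, List.map_cons, List.map_nil,
        List.sum_cons, List.sum_nil] at hle ⊢
      have hxF : x ∉ (pvPeel data)^[data.length] (pvKeys data) :=
        hstack x (List.mem_of_getLast? hlast)
      have hex := pvSize_expand data x hxF
      have hle2 : ((stack.dropLast ++ pvGet data x).map
          (pvSize data (data.length + 1))).sum ≤ f := by
        simp only [List.map_append, List.sum_append]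
        omega
      have hstack2 : ∀ y ∈ stack.dropLast ++ pvGet data x,
          y ∉ (pvPeel data)^[data.length] (pvKeys data) := by
        intro y hy
        rcases List.mem_append.mp hy with hy | hy
        · exact hstack y (List.mem_of_mem_dropLast hy)
        · exact pvPeel_fix_closed data x hxF y hy
      rw [ih (stack.dropLast ++ pvGet data x) (acc + (pvGet data x).length) hstack2 hle2]
      simp only [List.map_append, List.sum_append]
      have hcx := pvCnt_expand data x hxF
      omega

-- ===== VERDICT (by name: the statement is the Claim_ definition above) =====
theorem count_object_orbits_spec : Claim_equal_count_object_orbits := by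
  intro orbitting data _hdom hpre
  show count_object_orbits orbitting data = count_object_orbits_alt orbitting data
  have h := pvRunA_eq data (pvSize data (data.length + 1) orbitting)
    [orbitting] 0 (by intro x hx; rw [List.mem_singleton] at hx; subst hx; exact hpre)
    (by simp)
  simpa [count_object_orbits, count_object_orbits_alt] using h
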